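-- pv_equiv track=rewrite | github.com/facundou94/PFH_Google_Yelp | ETL.py | categorize_bien
-- ===== SOURCE A (Python) =====
-- def categorize_bien(categories):
--     if isinstance(categories, str):
--         if any(keyword in categories for keyword in ["Public beach", "public swimming pool", "Public educational institution",
--                                                       "Medical center", "Medical clinic", "Hospital",
--                                                       "General hospital", "Fire station", "Police department",
--                                                       "Police station", "State police", "Civil police",
--                                                       "Park", "Gym", "Pharmacy", "Fitness center"]):
--             return 1
--     return 0
-- ===== SOURCE B (Python) =====
-- KEYWORDS = ["Public beach", "public swimming pool", "Public educational institution",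
--             "Medical center", "Medical clinic", "Hospital",
--             "General hospital", "Fire station", "Police department",
--             "Police station", "State police", "Civil police",
--             "Park", "Gym", "Pharmacy", "Fitness center"]
--
--
-- def categorize_bien(categories):
--     # Single left-to-right scan over positions: at each position test whether
--     # some keyword starts there, instead of 16 separate full substring scans.
--     if not isinstance(categories, str):
--         return 0
--     for i in range(len(categories)):
--         for k in KEYWORDS:
--             if categories.startswith(k, i):
--                 return 1
--     return 0
-- ===== Notes on version B (the rewrite author's own statement) =====
-- stated objective: alternative
-- what changed: A runs 16 independent full substring scans ('k in categories' per keyword); B makes one left-to-right pass over the string positions and at each position tests whether some keyword starts there (startswith with offset), returning at the first hit.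
import Mathlib
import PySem

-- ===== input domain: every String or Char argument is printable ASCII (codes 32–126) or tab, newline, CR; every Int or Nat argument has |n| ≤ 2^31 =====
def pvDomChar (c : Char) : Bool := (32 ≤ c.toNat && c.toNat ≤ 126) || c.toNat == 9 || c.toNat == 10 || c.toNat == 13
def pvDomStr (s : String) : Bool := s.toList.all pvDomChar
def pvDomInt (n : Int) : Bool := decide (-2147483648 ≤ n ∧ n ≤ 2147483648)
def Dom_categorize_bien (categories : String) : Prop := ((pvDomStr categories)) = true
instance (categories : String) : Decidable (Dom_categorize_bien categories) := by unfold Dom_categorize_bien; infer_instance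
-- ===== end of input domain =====

-- B replaces A's 16 independent full substring scans by one left-to-right pass
-- testing, at each position, whether some keyword starts there (objective: alternative).

def pvKeywords : List String :=
  ["Public beach", "public swimming pool", "Public educational institution",
   "Medical center", "Medical clinic", "Hospital",
   "General hospital", "Fire station", "Police department",
   "Police station", "State police", "Civil police",
   "Park", "Gym", "Pharmacy", "Fitness center"]

-- ===== PORT A =====
-- any(keyword in categories for keyword in [...]) — each 'in' is a full substring scan
def categorize_bien (categories : String) : Int :=
  if pvKeywords.any (fun k => PySem.Str.isIn k categories) then 1 else 0

-- ===== PORT B =====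
-- one pass over the suffixes of the string; at each position test each keyword as a prefix
def pvScan (kws : List (List Char)) (cs : List Char) : Bool :=
  match cs with
  | [] => false
  | _ :: t => kws.any (fun k => PySem.Chars.startswith cs k) || pvScan kws t

def categorize_bien_alt (categories : String) : Int :=
  if pvScan (pvKeywords.map String.toList) categories.toList then 1 else 0

-- ===== PRECONDITION & SPEC =====
def Spec_categorize_bien (categories : String) (out : Int) : Prop := out = categorize_bien_alt categories
instance (categories : String) (out : Int) : Decidable (Spec_categorize_bien categories out) := by unfold Spec_categorize_bien; infer_instance

-- ===== CLAIM (what is proved, stated in full; the proofs are below) =====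
def Claim_equal_categorize_bien : Prop := ∀ (categories : String), Dom_categorize_bien categories → Spec_categorize_bien categories (categorize_bien categories)

-- ===== LEMMAS AND PROOFS =====

-- the position scan finds exactly the keywords occurring as an infix (keywords are nonempty)
theorem pvScan_iff (kws : List (List Char)) (hne : ∀ k ∈ kws, k ≠ []) (cs : List Char) :
    pvScan kws cs = true ↔ ∃ k ∈ kws, k <:+: cs := by
  induction cs with
  | nil =>
      simp only [pvScan, Bool.false_eq_true, false_iff]
      rintro ⟨k, hk, h⟩
      exact hne k hk (List.eq_nil_of_infix_nil h)
  | cons c t ih =>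
      simp only [pvScan, Bool.or_eq_true, List.any_eq_true, ih,
        PySem.Chars.startswith_iff, List.infix_cons_iff]
      constructor
      · rintro (⟨k, hk, h⟩ | ⟨k, hk, h⟩)
        · exact ⟨k, hk, Or.inl h⟩
        · exact ⟨k, hk, Or.inr h⟩
      · rintro ⟨k, hk, h | h⟩
        · exact Or.inl ⟨k, hk, h⟩
        · exact Or.inr ⟨k, hk, h⟩

-- ===== VERDICT (by name: the statement is the Claim_ definition above) =====
theorem categorize_bien_spec : Claim_equal_categorize_bien := by
  intro categories _
  unfold Spec_categorize_bien categorize_bien categorize_bien_alt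
  have h : (pvKeywords.any (fun k => PySem.Str.isIn k categories)) =
      pvScan (pvKeywords.map String.toList) categories.toList := by
    rw [Bool.eq_iff_iff]
    rw [pvScan_iff _ (by decide)]
    simp only [List.any_eq_true, PySem.Str.isIn_iff_infix, List.mem_map]
    constructor
    · rintro ⟨k, hk, h⟩; exact ⟨k.toList, ⟨k, hk, rfl⟩, h⟩
    · rintro ⟨l, ⟨k, hk, rfl⟩, h⟩; exact ⟨k, hk, h⟩
  rw [h]
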